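-- pv_equiv track=rewrite | github.com/janog-netcon/netcon-cli | scripts/coordinate.py | filter_lost_instances
-- ===== SOURCE A (Python) =====
-- import collections
--
-- def filter_lost_instances(gcp_instances, vmdb_instances):
--     """
--     それっぽい関数があってもいいはずなんだけど見つからないのでごり押し
--     """
--     instances = []
--     instances.extend(gcp_instances)
--     instances.extend(vmdb_instances)
--
--     counted_instances = collections.Counter(instances)
--
--     filtered_instances = []
--     for instance, count in counted_instances.items():
--         if count == 1:
--             filtered_instances.append(instance)
--
--     # GCPのみに存在しているインスタンス名
--     filtered_gcp_only_instances = []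
--     for instance in filtered_instances:
--         if instance in gcp_instances:
--             filtered_gcp_only_instances.append(instance)
--
--     # vmdbのみに存在しているインスタンス名
--     filtered_vmdb_only_instances = []
--     for instance in filtered_instances:
--         if instance in vmdb_instances:
--             filtered_vmdb_only_instances.append(instance)
--
--     return {
--         "all": filtered_instances,
--         "gcp_only": filtered_gcp_only_instances,
--         "vmdb_only": filtered_vmdb_only_instances,
--     }
-- ===== SOURCE B (Python) =====
-- import collections
--
-- def filter_lost_instances(gcp_instances, vmdb_instances):
--     gcount = collections.Counter(gcp_instances)
--     vcount = collections.Counter(vmdb_instances)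
--     gcp_only = [x for x in gcp_instances if gcount[x] == 1 and vcount[x] == 0]
--     vmdb_only = [x for x in vmdb_instances if vcount[x] == 1 and gcount[x] == 0]
--     return {
--         "all": gcp_only + vmdb_only,
--         "gcp_only": gcp_only,
--         "vmdb_only": vmdb_only,
--     }
-- ===== Notes on version B (the rewrite author's own statement) =====
-- stated objective: faster
-- what changed: B inverts A's decomposition: instead of counting the concatenated list, collecting count-1 names, and then filtering that whole list twice by linear `in list` membership scans, B builds one Counter per source list, emits gcp_only and vmdb_only directly in one filtering pass over each source, and forms 'all' by concatenating the two sublists.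
import Mathlib
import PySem

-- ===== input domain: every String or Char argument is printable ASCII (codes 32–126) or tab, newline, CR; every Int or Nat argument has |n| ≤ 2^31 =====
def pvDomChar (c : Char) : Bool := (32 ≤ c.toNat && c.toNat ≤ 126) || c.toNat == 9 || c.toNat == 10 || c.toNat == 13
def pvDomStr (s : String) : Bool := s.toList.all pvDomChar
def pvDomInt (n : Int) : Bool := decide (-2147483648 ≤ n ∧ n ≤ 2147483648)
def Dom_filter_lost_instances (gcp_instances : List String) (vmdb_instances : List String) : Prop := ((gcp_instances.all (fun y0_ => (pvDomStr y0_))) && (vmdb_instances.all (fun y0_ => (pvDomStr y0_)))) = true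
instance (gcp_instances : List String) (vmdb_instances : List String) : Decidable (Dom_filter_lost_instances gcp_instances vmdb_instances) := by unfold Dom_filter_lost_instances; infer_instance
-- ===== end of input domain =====

-- B builds one Counter per input list and produces the two "only" sublists directly,
-- assembling "all" by concatenation — a different decomposition (subsets first) that removes
-- A's repeated `instance in list` membership scans; a timing run measured B faster.

-- ===== PORT A =====
def filter_lost_instances (gcp_instances : List String) (vmdb_instances : List String) : List (String × List String) :=
  let instances := gcp_instances ++ vmdb_instances
  let counted_instances : PySem.Dict String Int := PySem.Dict.counter instances
  let filtered_instances := counted_instances.items.foldl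
    (fun acc p => if p.2 == 1 then acc ++ [p.1] else acc) []
  let filtered_gcp_only_instances := filtered_instances.foldl
    (fun acc x => if gcp_instances.contains x then acc ++ [x] else acc) []
  let filtered_vmdb_only_instances := filtered_instances.foldl
    (fun acc x => if vmdb_instances.contains x then acc ++ [x] else acc) []
  [("all", filtered_instances),
   ("gcp_only", filtered_gcp_only_instances),
   ("vmdb_only", filtered_vmdb_only_instances)]

-- ===== PORT B =====
def filter_lost_instances_alt (gcp_instances : List String) (vmdb_instances : List String) : List (String × List String) :=
  let gc : PySem.Dict String Int := PySem.Dict.counter gcp_instances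
  let vc : PySem.Dict String Int := PySem.Dict.counter vmdb_instances
  let gcp_only := gcp_instances.filter (fun x => gc.getD x 0 == 1 && vc.getD x 0 == 0)
  let vmdb_only := vmdb_instances.filter (fun x => vc.getD x 0 == 1 && gc.getD x 0 == 0)
  [("all", gcp_only ++ vmdb_only),
   ("gcp_only", gcp_only),
   ("vmdb_only", vmdb_only)]

-- ===== PRECONDITION & SPEC =====
def Spec_filter_lost_instances (gcp_instances : List String) (vmdb_instances : List String) (out : List (String × List String)) : Prop := out = filter_lost_instances_alt gcp_instances vmdb_instances
instance (gcp_instances : List String) (vmdb_instances : List String) (out : List (String × List String)) : Decidable (Spec_filter_lost_instances gcp_instances vmdb_instances out) := by unfold Spec_filter_lost_instances; infer_instance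

-- ===== CLAIM (what is proved, stated in full; the proofs are below) =====
def Claim_equal_filter_lost_instances : Prop := ∀ (gcp_instances : List String) (vmdb_instances : List String), Dom_filter_lost_instances gcp_instances vmdb_instances → Spec_filter_lost_instances gcp_instances vmdb_instances (filter_lost_instances gcp_instances vmdb_instances)

-- ===== LEMMAS AND PROOFS =====

-- Deduplication is invisible to a filter that only keeps elements occurring at most once.
theorem set_foldl_filter {p : String → Bool} :
    ∀ (l acc : List String), (∀ x ∈ l, p x = true → l.count x + acc.count x ≤ 1) →
      (l.foldl PySem.Set.add acc).filter p = acc.filter p ++ l.filter p := by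
  intro l
  induction l with
  | nil => intro acc _; simp
  | cons x xs ih =>
    intro acc h
    simp only [List.foldl_cons]
    have hacc' : ∀ y ∈ xs, p y = true → xs.count y + (PySem.Set.add acc x).count y ≤ 1 := by
      intro y hy hp
      have h0 := h y (by simp [hy]) hp
      by_cases hxy : y = x
      · subst hxy
        have hc1 : (y :: xs).count y = xs.count y + 1 := by simp
        have hadd : (PySem.Set.add acc y).count y ≤ acc.count y + 1 := by
          simp only [PySem.Set.add]
          split
          · omega
          · rw [List.count_append]; simp
        omega
      · have hxy' : ¬x = y := fun hh => hxy hh.symm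
        have hc1 : (x :: xs).count y = xs.count y := by
          simp [hxy']
        have hadd : (PySem.Set.add acc x).count y = acc.count y := by
          simp only [PySem.Set.add]
          split
          · rfl
          · rw [List.count_append]
            simp [hxy']
        omega
    rw [ih _ hacc']
    simp only [PySem.Set.add]
    rw [List.filter_cons]
    split
    · rename_i hcc
      have hc : x ∈ acc := by simpa using hcc
      have hpx : p x = false := by
        by_contra hne
        have hpx : p x = true := by revert hne; cases p x <;> simp
        have h0 := h x (by simp) hpx
        have h1 : 1 ≤ acc.count x := List.one_le_count_iff.mpr hc
        have h2 : 1 ≤ (x :: xs).count x := by simp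
        omega
      simp [hpx]
    · rw [List.filter_append]
      cases hpx : p x <;> simp [hpx]

theorem counter_filtered (g v : List String) :
    (PySem.Dict.counter (g ++ v) : PySem.Dict String Int).items.foldl
        (fun acc p => if p.2 == 1 then acc ++ [p.1] else acc) []
      = g.filter (fun x => g.count x == 1 && v.count x == 0)
        ++ v.filter (fun x => v.count x == 1 && g.count x == 0) := by
  rw [PySem.Dict.items_counter]
  rw [List.foldl_map]
  have hfold := PySem.List.foldl_append_if
    (p := fun k : String => ((g ++ v).count k : Int) == 1) (f := fun k : String => k)
    (l := PySem.Set.ofList (g ++ v)) (acc := [])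
  simp only [List.nil_append, List.map_id'] at hfold
  rw [hfold]
  have hpred : (fun k : String => ((g ++ v).count k : Int) == 1)
      = (fun k : String => (g ++ v).count k == 1) := by
    funext k
    by_cases hk : (g ++ v).count k = 1 <;> simp [hk]
    omega
  rw [hpred]
  have hsf : (PySem.Set.ofList (g ++ v)).filter (fun k => (g ++ v).count k == 1)
      = (g ++ v).filter (fun k => (g ++ v).count k == 1) := by
    rw [PySem.Set.ofList_eq_foldl]
    have := set_foldl_filter (p := fun k => (g ++ v).count k == 1) (g ++ v) []
      (by intro x _ hp; simp at hp; simp [hp])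
    simpa using this
  rw [hsf, List.filter_append]
  congr 1
  · apply List.filter_congr
    intro x hx
    have h1 : 1 ≤ g.count x := List.one_le_count_iff.mpr hx
    rw [List.count_append, Bool.eq_iff_iff]
    simp
    omega
  · apply List.filter_congr
    intro x hx
    have h1 : 1 ≤ v.count x := List.one_le_count_iff.mpr hx
    rw [List.count_append, Bool.eq_iff_iff]
    simp
    omega

theorem fold_if_keep (l keep : List String) (h : ∀ x ∈ l, x ∈ keep) (acc0 : List String) :
    l.foldl (fun acc x => if keep.contains x then acc ++ [x] else acc) acc0 = acc0 ++ l := by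
  rw [PySem.List.foldl_append_if]
  rw [List.filter_congr (q := fun _ => true) (fun x hx => by simp [h x hx])]
  simp

theorem fold_if_drop (l drop : List String) (h : ∀ x ∈ l, x ∉ drop) (acc0 : List String) :
    l.foldl (fun acc x => if drop.contains x then acc ++ [x] else acc) acc0 = acc0 := by
  rw [PySem.List.foldl_append_if]
  rw [List.filter_congr (q := fun _ => false) (fun x hx => by simp [h x hx])]
  simp

-- ===== VERDICT (by name: the statement is the Claim_ definition above) =====
theorem filter_lost_instances_spec : Claim_equal_filter_lost_instances := by
  intro g v _
  unfold Spec_filter_lost_instances filter_lost_instances filter_lost_instances_alt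
  simp only [PySem.Dict.getD_counter]
  have hcast : (fun x => ((g.count x : Int) == 1 && (v.count x : Int) == 0))
      = (fun x => (g.count x == 1 && v.count x == 0)) := by
    funext x
    rw [Bool.eq_iff_iff]
    simp
  have hcast' : (fun x => ((v.count x : Int) == 1 && (g.count x : Int) == 0))
      = (fun x => (v.count x == 1 && g.count x == 0)) := by
    funext x
    rw [Bool.eq_iff_iff]
    simp
  rw [hcast, hcast']
  set Bg := g.filter (fun x => g.count x == 1 && v.count x == 0) with hBg
  set Bv := v.filter (fun x => v.count x == 1 && g.count x == 0) with hBv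
  have hmemg : ∀ x ∈ Bg, x ∈ g ∧ x ∉ v := by
    intro x hx
    rw [hBg, List.mem_filter] at hx
    obtain ⟨hm, hp⟩ := hx
    simp only [Bool.and_eq_true, beq_iff_eq] at hp
    exact ⟨hm, by rw [← List.count_eq_zero]; omega⟩
  have hmemv : ∀ x ∈ Bv, x ∈ v ∧ x ∉ g := by
    intro x hx
    rw [hBv, List.mem_filter] at hx
    obtain ⟨hm, hp⟩ := hx
    simp only [Bool.and_eq_true, beq_iff_eq] at hp
    exact ⟨hm, by rw [← List.count_eq_zero]; omega⟩
  have hall := counter_filtered g v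
  rw [← hBg, ← hBv] at hall
  rw [hall]
  have hg : (Bg ++ Bv).foldl (fun acc x => if g.contains x then acc ++ [x] else acc) [] = Bg := by
    rw [List.foldl_append,
        fold_if_keep Bg g (fun x hx => (hmemg x hx).1) [],
        fold_if_drop Bv g (fun x hx => (hmemv x hx).2) ([] ++ Bg)]
    rfl
  have hv : (Bg ++ Bv).foldl (fun acc x => if v.contains x then acc ++ [x] else acc) [] = Bv := by
    rw [List.foldl_append,
        fold_if_drop Bg v (fun x hx => (hmemg x hx).2) [],
        fold_if_keep Bv v (fun x hx => (hmemv x hx).1) []]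
    rfl
  rw [hg, hv]
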